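-- pv_equiv track=rewrite | github.com/clee421/advent-of-code | 2024/day20/run.py | get_distance_set
-- ===== SOURCE A (Python) =====
-- from typing import Dict, List, Tuple, Set
--
-- def get_distance_set(distance: int) -> Set[Tuple[int, int]]:
--     dist_set = set()
--     for i in range(-distance, distance+1):
--         for j in range(-distance, distance+1):
--             # d = Σ|A_i – B_i|
--             # d = |x_1 - x_2| + |y_1 - y_2|
--             d = abs(i) + abs(j)
--             if d <= 20:
--                 dist_set.add((i, j))
--
--     return dist_set
-- ===== SOURCE B (Python) =====
-- def get_distance_set(distance: int):
--     # Directly construct the diamond |i|+|j| <= 20 clipped to the square, as a set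
--     # of a flat comprehension with clipped bounds -- no membership test per cell.
--     return set(
--         (i, j)
--         for i in range(max(-distance, -20), min(distance, 20) + 1)
--         for j in range(max(-distance, abs(i) - 20), min(distance, 20 - abs(i)) + 1)
--     )
-- ===== Notes on version B (the rewrite author's own statement) =====
-- stated objective: faster
-- what changed: Instead of scanning the whole (2*distance+1)^2 square and testing each cell before inserting into a growing set, B generates the diamond |i|+|j|<=20 directly as one flat comprehension with per-row clipped bounds and builds the set once from it.
import Mathlib
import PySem

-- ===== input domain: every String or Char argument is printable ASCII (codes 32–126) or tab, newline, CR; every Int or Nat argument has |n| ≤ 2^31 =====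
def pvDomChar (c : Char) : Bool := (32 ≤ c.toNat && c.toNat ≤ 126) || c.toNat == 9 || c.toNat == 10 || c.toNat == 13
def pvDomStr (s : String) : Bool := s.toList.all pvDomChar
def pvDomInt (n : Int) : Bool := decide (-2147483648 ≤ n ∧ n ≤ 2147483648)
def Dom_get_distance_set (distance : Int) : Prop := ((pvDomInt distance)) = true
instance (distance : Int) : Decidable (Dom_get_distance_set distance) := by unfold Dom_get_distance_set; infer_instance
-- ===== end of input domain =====

-- B builds the diamond |i|+|j| ≤ 20 directly as one flat comprehension with clipped
-- per-row bounds and makes the set from it once (objective: faster, asymptotically).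

-- ===== PORT A =====
def get_distance_set (distance : Int) : List (Int × Int) :=
  (PySem.List.pyRange (-distance) (distance + 1) 1).foldl (fun dist_set i =>
    (PySem.List.pyRange (-distance) (distance + 1) 1).foldl (fun dist_set j =>
      let d := |i| + |j|
      if d ≤ 20 then PySem.Set.add dist_set (i, j) else dist_set) dist_set)
    (PySem.Set.empty)

-- ===== PORT B =====
def get_distance_set_alt (distance : Int) : List (Int × Int) :=
  PySem.Set.ofList
    ((PySem.List.pyRange (max (-distance) (-20)) (min distance 20 + 1) 1).flatMap
      (fun i =>
        (PySem.List.pyRange (max (-distance) (|i| - 20)) (min distance (20 - |i|) + 1) 1).map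
          (fun j => (i, j))))

-- ===== PRECONDITION & SPEC =====
def Spec_get_distance_set (distance : Int) (out : List (Int × Int)) : Prop := out = get_distance_set_alt distance
instance (distance : Int) (out : List (Int × Int)) : Decidable (Spec_get_distance_set distance out) := by unfold Spec_get_distance_set; infer_instance

-- ===== CLAIM (what is proved, stated in full; the proofs are below) =====
def Claim_equal_get_distance_set : Prop := ∀ (distance : Int), Dom_get_distance_set distance → Spec_get_distance_set distance (get_distance_set distance)

-- ===== LEMMAS AND PROOFS =====

-- Folding Set.add over a duplicate-free list of elements not already present just appends them.
lemma foldl_set_add_fresh {α : Type} [BEq α] [LawfulBEq α] (L : List α) (s : List α)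
    (hL : L.Nodup) (hs : ∀ x ∈ L, x ∉ s) : L.foldl PySem.Set.add s = s ++ L := by
  induction L generalizing s with
  | nil => simp
  | cons x L ih =>
    have hx : x ∉ s := hs x (by simp)
    have hadd : PySem.Set.add s x = s ++ [x] := by
      simp [PySem.Set.add]
      intro h
      exact absurd h hx
    simp only [List.foldl_cons, hadd]
    rw [ih (s ++ [x]) hL.of_cons]
    · simp
    · intro y hy
      simp only [List.mem_append, List.mem_singleton]
      rintro (h | rfl)
      · exact hs y (by simp [hy]) h
      · exact (List.nodup_cons.mp hL).1 hy

-- Nested set-building over distinct rows appends one block per row.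
lemma fold_blocks (I : List Int) (J : Int → List Int) (hI : I.Nodup) (hJ : ∀ i, (J i).Nodup)
    (s : List (Int × Int)) (hs : ∀ p ∈ s, p.1 ∉ I) :
    I.foldl (fun s i => (J i).foldl (fun s j => PySem.Set.add s (i, j)) s) s
      = s ++ I.flatMap (fun i => (J i).map (fun j => (i, j))) := by
  induction I generalizing s with
  | nil => simp
  | cons i I ih =>
    have hblock : (J i).foldl (fun s j => PySem.Set.add s (i, j)) s
        = s ++ (J i).map (fun j => (i, j)) := by
      have := foldl_set_add_fresh ((J i).map (fun j => (i, j))) s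
        ((hJ i).map (fun a b h => by simpa using congrArg Prod.snd h))
        (by
          intro x hx hxs
          rcases List.mem_map.mp hx with ⟨j, _, rfl⟩
          exact hs _ hxs (by simp))
      rw [← this, List.foldl_map]
    simp only [List.foldl_cons, hblock]
    rw [ih (List.nodup_cons.mp hI).2 (s ++ (J i).map (fun j => (i, j)))]
    · simp
    · intro p hp
      rcases List.mem_append.mp hp with h | h
      · exact fun hmem => hs p h (List.mem_cons_of_mem _ hmem)
      · rcases List.mem_map.mp h with ⟨j, _, rfl⟩
        exact (List.nodup_cons.mp hI).1

-- A flatMap of tagged rows over distinct tags has no duplicates.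
lemma nodup_flatMap_rows (I : List Int) (J : Int → List Int) (hI : I.Nodup)
    (hJ : ∀ i, (J i).Nodup) :
    (I.flatMap (fun i => (J i).map (fun j => (i, j)))).Nodup := by
  induction I with
  | nil => simp
  | cons i I ih =>
    simp only [List.flatMap_cons]
    apply List.Nodup.append
    · exact (hJ i).map (fun a b h => by simpa using congrArg Prod.snd h)
    · exact ih (List.nodup_cons.mp hI).2
    · intro p hp hp'
      rcases List.mem_map.mp hp with ⟨j, _, rfl⟩
      rcases List.mem_flatMap.mp hp' with ⟨i', hi', hmem⟩
      rcases List.mem_map.mp hmem with ⟨j', _, hpair⟩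
      have : i' = i := congrArg Prod.fst hpair
      exact (List.nodup_cons.mp hI).1 (this ▸ hi')

-- An if-guarded fold is a fold over the filtered list.
lemma foldl_ite_filter {α β : Type} (p : β → Prop) [DecidablePred p] (f : α → β → α)
    (l : List β) (s : α) :
    l.foldl (fun s x => if p x then f s x else s) s
      = (l.filter (fun x => decide (p x))).foldl f s := by
  induction l generalizing s with
  | nil => rfl
  | cons x l ih =>
    by_cases h : p x <;> simp [h, ih]

-- Filtering an integer range by an interval clips the range.
lemma filter_pyRange_interval (a b lo hi : Int) :
    (PySem.List.pyRange a b 1).filter (fun j => decide (lo ≤ j ∧ j ≤ hi))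
      = PySem.List.pyRange (max a lo) (min b (hi + 1)) 1 := by
  have h1 : ((PySem.List.pyRange a b 1).filter (fun j => decide (lo ≤ j ∧ j ≤ hi))).Pairwise (· < ·) :=
    (PySem.List.pairwise_lt_pyRange_one a b).sublist (List.filter_sublist)
  have h2 := PySem.List.pairwise_lt_pyRange_one (max a lo) (min b (hi + 1))
  have hperm : ((PySem.List.pyRange a b 1).filter (fun j => decide (lo ≤ j ∧ j ≤ hi))).Perm
      (PySem.List.pyRange (max a lo) (min b (hi + 1)) 1) := by
    apply (List.perm_ext_iff_of_nodup
      ((PySem.List.nodup_pyRange_one a b).filter _)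
      (PySem.List.nodup_pyRange_one _ _)).mpr
    intro x
    simp [List.mem_filter, PySem.List.mem_pyRange_one]
    omega
  exact List.Perm.eq_of_pairwise (fun x y _ _ h h2 => absurd h2 (not_lt.mpr h.le)) h1 h2 hperm

-- The per-row block of A, written as B's clipped range.
lemma row_eq (d i : Int) :
    (PySem.List.pyRange (-d) (d + 1) 1).filter (fun j => decide (|i| + |j| ≤ 20))
      = PySem.List.pyRange (max (-d) (|i| - 20)) (min d (20 - |i|) + 1) 1 := by
  have hc : ∀ j : Int, decide (|i| + |j| ≤ 20) = decide (|i| - 20 ≤ j ∧ j ≤ 20 - |i|) := by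
    intro j
    have h := abs_nonneg i
    rcases abs_cases j with ⟨hj, hj'⟩ | ⟨hj, hj'⟩ <;> rw [hj] <;> simp only [decide_eq_decide] <;> omega
  rw [List.filter_congr (fun x _ => hc x), filter_pyRange_interval]
  have : min (d + 1) (20 - |i| + 1) = min d (20 - |i|) + 1 := by omega
  rw [this]

-- A as one flatMap of clipped rows.
lemma portA_flatMap (d : Int) :
    get_distance_set d = (PySem.List.pyRange (-d) (d + 1) 1).flatMap (fun i =>
      (PySem.List.pyRange (max (-d) (|i| - 20)) (min d (20 - |i|) + 1) 1).map
        (fun j => (i, j))) := by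
  unfold get_distance_set
  have hbody : (fun (dist_set : List (Int × Int)) (i : Int) =>
      (PySem.List.pyRange (-d) (d + 1) 1).foldl (fun dist_set j =>
        let dd := |i| + |j|
        if dd ≤ 20 then PySem.Set.add dist_set (i, j) else dist_set) dist_set)
      = fun dist_set i =>
      (PySem.List.pyRange (max (-d) (|i| - 20)) (min d (20 - |i|) + 1) 1).foldl
        (fun s j => PySem.Set.add s (i, j)) dist_set := by
    funext s i
    show (PySem.List.pyRange (-d) (d + 1) 1).foldl
      (fun s j => if |i| + |j| ≤ 20 then PySem.Set.add s (i, j) else s) s = _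
    rw [foldl_ite_filter (fun j => |i| + |j| ≤ 20) (fun s j => PySem.Set.add s (i, j)), row_eq]
  rw [hbody]
  exact fold_blocks _ _ (PySem.List.nodup_pyRange_one _ _)
    (fun i => PySem.List.nodup_pyRange_one _ _) PySem.Set.empty (by simp [PySem.Set.empty])

-- B's generated list has no duplicates, so set() of it is itself.
lemma portB_flatMap (d : Int) :
    get_distance_set_alt d = (PySem.List.pyRange (max (-d) (-20)) (min d 20 + 1) 1).flatMap
      (fun i => (PySem.List.pyRange (max (-d) (|i| - 20)) (min d (20 - |i|) + 1) 1).map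
        (fun j => (i, j))) := by
  unfold get_distance_set_alt
  exact PySem.Set.ofList_eq_self_of_nodup _
    (nodup_flatMap_rows _ _ (PySem.List.nodup_pyRange_one _ _)
      (fun i => PySem.List.nodup_pyRange_one _ _))

-- Rows with |i| > 20 are empty, so A's extra outer iterations contribute nothing.
lemma row_nil (d i : Int) (h : 20 < |i|) :
    PySem.List.pyRange (max (-d) (|i| - 20)) (min d (20 - |i|) + 1) 1 = [] := by
  apply PySem.List.pyRange_one_eq_nil
  omega

theorem get_distance_set_eq (d : Int) : get_distance_set d = get_distance_set_alt d := by
  rw [portA_flatMap, portB_flatMap]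
  by_cases hd : d ≤ 20
  · have h1 : max (-d) (-20) = -d := by omega
    have h2 : min d 20 + 1 = d + 1 := by omega
    rw [h1, h2]
  · replace hd := lt_of_not_ge hd
    have h1 : max (-d) (-20) = -20 := by omega
    have h2 : min d 20 + 1 = 21 := by omega
    rw [h1, h2]
    rw [PySem.List.pyRange_one_append (-d) (-20) (d + 1) (by omega) (by omega),
        PySem.List.pyRange_one_append (-20) 21 (d + 1) (by omega) (by omega)]
    rw [List.flatMap_append, List.flatMap_append]
    have hleft : (PySem.List.pyRange (-d) (-20) 1).flatMap (fun i =>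
        (PySem.List.pyRange (max (-d) (|i| - 20)) (min d (20 - |i|) + 1) 1).map
          (fun j => (i, j))) = [] := by
      apply List.flatMap_eq_nil_iff.mpr
      intro i hi
      rw [row_nil d i (by
        have := (PySem.List.mem_pyRange_one.mp hi)
        rcases abs_cases i with ⟨h, _⟩ | ⟨h, _⟩ <;> omega)]
      rfl
    have hright : (PySem.List.pyRange 21 (d + 1) 1).flatMap (fun i =>
        (PySem.List.pyRange (max (-d) (|i| - 20)) (min d (20 - |i|) + 1) 1).map
          (fun j => (i, j))) = [] := by
      apply List.flatMap_eq_nil_iff.mpr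
      intro i hi
      rw [row_nil d i (by
        have := (PySem.List.mem_pyRange_one.mp hi)
        rcases abs_cases i with ⟨h, _⟩ | ⟨h, _⟩ <;> omega)]
      rfl
    rw [hleft, hright]
    simp

-- ===== VERDICT (by name: the statement is the Claim_ definition above) =====
theorem get_distance_set_spec : Claim_equal_get_distance_set := by
  intro d _
  exact get_distance_set_eq d
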